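-- pv_equiv track=rewrite | github.com/KelloggLab/TagmentationAnalysis | postprocessHelpers.py | _pam_matches_at
-- ===== SOURCE A (Python) =====
-- from typing import Optional, List, Literal, Dict
--
-- IUPAC_DNA: Dict[str, str] = {
--     "A": "A",
--     "C": "C",
--     "G": "G",
--     "T": "T",
--     "U": "T",
--     "R": "[AG]",
--     "Y": "[CT]",
--     "S": "[GC]",
--     "W": "[AT]",
--     "K": "[GT]",
--     "M": "[AC]",
--     "B": "[CGT]",
--     "D": "[AGT]",
--     "H": "[ACT]",
--     "V": "[ACG]",
--     "N": "[ACGT]",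
-- }
--
-- def _pam_matches_at(seq: str, i: int, pam: str) -> bool:
--     if i < 0 or i + len(pam) > len(seq):
--         return False
--     for j, code in enumerate(pam.upper()):
--         base = seq[i + j].upper().replace("U", "T")
--         allowed = IUPAC_DNA[code]
--         if allowed.startswith("["):
--             if base not in allowed.strip("[]"):
--                 return False
--         else:
--             if base != allowed:
--                 return False
--     return True
-- ===== SOURCE B (Python) =====
-- IUPAC_DNA = {
--     "A": "A", "C": "C", "G": "G", "T": "T", "U": "T",
--     "R": "[AG]", "Y": "[CT]", "S": "[GC]", "W": "[AT]", "K": "[GT]", "M": "[AC]",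
--     "B": "[CGT]", "D": "[AGT]", "H": "[ACT]", "V": "[ACG]", "N": "[ACGT]",
-- }
--
-- def _fullmatch(pat, sub):
--     """Anchored match of a pattern made of literal bases and [..] classes."""
--     if not sub:
--         return not pat
--     if not pat:
--         return False
--     ch, rest = sub[0], sub[1:]
--     if pat[0] == '[':
--         end = pat.index(']')
--         return ch in pat[1:end] and _fullmatch(pat[end + 1:], rest)
--     return ch == pat[0] and _fullmatch(pat[1:], rest)
--
-- def _pam_matches_at(seq: str, i: int, pam: str) -> bool:
--     if i < 0 or i + len(pam) > len(seq):
--         return False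
--     pattern = "".join(IUPAC_DNA[c] for c in pam.upper())
--     sub = seq[i:i + len(pam)].upper().replace("U", "T")
--     return _fullmatch(pattern, sub)
-- ===== Notes on version B (the rewrite author's own statement) =====
-- stated objective: alternative
-- what changed: Replaces A's per-character dict-lookup-and-branch loop by a compile-then-match strategy: B first concatenates the IUPAC entries into one anchored literal/[class] pattern string, normalizes the whole candidate window once (upper, U->T), and then runs a small generic anchored pattern matcher over pattern and window.
-- outside the precondition, e.g. on _pam_matches_at('AAAA', 0, 'CX'): A returns False, B raises KeyError
import Mathlib
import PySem

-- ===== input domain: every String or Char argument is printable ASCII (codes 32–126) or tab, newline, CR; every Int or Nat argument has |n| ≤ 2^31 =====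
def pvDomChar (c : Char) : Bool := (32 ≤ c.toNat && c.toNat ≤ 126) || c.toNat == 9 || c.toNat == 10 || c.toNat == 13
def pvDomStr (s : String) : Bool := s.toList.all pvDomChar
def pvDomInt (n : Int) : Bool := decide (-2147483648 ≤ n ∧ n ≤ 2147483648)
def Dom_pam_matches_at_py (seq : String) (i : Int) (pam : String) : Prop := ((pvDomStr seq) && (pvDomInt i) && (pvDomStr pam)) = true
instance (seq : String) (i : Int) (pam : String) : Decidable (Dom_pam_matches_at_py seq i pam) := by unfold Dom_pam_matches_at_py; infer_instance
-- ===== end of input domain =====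

-- B replaces A's per-character branch-on-IUPAC loop by a compile-then-match strategy: it first
-- concatenates the IUPAC entries into one anchored literal/[class] pattern, normalizes the whole
-- candidate window once, and then runs a generic pattern matcher (objective: alternative).


-- ===== PORT A =====
def IUPAC_DNA : PySem.Dict String String :=
  PySem.Dict.mk [("A","A"),("C","C"),("G","G"),("T","T"),("U","T"),
    ("R","[AG]"),("Y","[CT]"),("S","[GC]"),("W","[AT]"),("K","[GT]"),("M","[AC]"),
    ("B","[CGT]"),("D","[AGT]"),("H","[ACT]"),("V","[ACG]"),("N","[ACGT]")]

-- the 'for j, code in enumerate(pam.upper())' loop; enumerate is ported as List.zipIdx ((element, index) pairs).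
-- seq[i+j] is always in range when the loop runs (bounds guard), so the `.getD ' '` default is unreachable;
-- IUPAC_DNA[code] raises KeyError on non-IUPAC codes (excluded by Pre_), so `.getD ""` is unreachable inside Pre_.
def pamLoopA (seq : String) (i : Int) : List (Char × Nat) → Bool
  | [] => true
  | (code, j) :: rest =>
    let base := PySem.Str.replace (PySem.Str.upper (String.ofList [(PySem.Str.pyGet? seq (i + (j : Int))).getD ' '])) "U" "T"
    let allowed := (PySem.Dict.get? IUPAC_DNA (String.ofList [code])).getD ""
    if PySem.Str.startswith allowed "[" then
      if !PySem.Str.isIn base (PySem.Str.stripChars allowed "[]") then false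
      else pamLoopA seq i rest
    else
      if base != allowed then false
      else pamLoopA seq i rest

def pam_matches_at_py (seq : String) (i : Int) (pam : String) : Bool :=
  if i < 0 ∨ i + PySem.Str.len pam > PySem.Str.len seq then false
  else pamLoopA seq i ((PySem.Str.upper pam).toList.zipIdx)

-- ===== PORT B =====
-- Source B carries its own copy of the IUPAC table; it is byte-identical to A's, so the port shares IUPAC_DNA.
-- port of Source B's _fullmatch, on the code-point lists of the two strings.
-- Python's pat.index(']') / pat[1:end] / pat[end+1:] are ported as takeWhile / dropWhile+drop on the
-- tail: exact whenever ']' occurs in pat (index raises otherwise; patterns built by _pam_matches_at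
-- always close their brackets, so the two computations agree on every reachable pattern).
def fullmatchB : List Char → List Char → Bool
  | pat, [] => pat.isEmpty
  | [], _ :: _ => false
  | p :: ps, ch :: rest =>
    if p = '[' then
      ((ps.takeWhile (fun x => x != ']')).contains ch) &&
        fullmatchB ((ps.dropWhile (fun x => x != ']')).drop 1) rest
    else (ch == p) && fullmatchB ps rest

-- '"".join(IUPAC_DNA[c] for c in pam.upper())' is the flatMap below; KeyError (non-IUPAC code) is
-- excluded by Pre_, so the `.getD ""` default is unreachable inside Pre_.
def pam_matches_at_py_alt (seq : String) (i : Int) (pam : String) : Bool :=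
  if i < 0 ∨ i + PySem.Str.len pam > PySem.Str.len seq then false
  else
    let pattern := (PySem.Str.upper pam).toList.flatMap
      (fun c => ((PySem.Dict.get? IUPAC_DNA (String.ofList [c])).getD "").toList)
    let sub := PySem.Str.replace (PySem.Str.upper (PySem.Str.slice seq (some i) (some (i + PySem.Str.len pam)))) "U" "T"
    fullmatchB pattern sub.toList

-- ===== PRECONDITION & SPEC =====
-- Pre_ excludes in-bounds calls whose pam contains a character that is not an IUPAC code after
-- uppercasing: on those Python A raises KeyError unless an earlier position already mismatched
-- (where A returns False while B, which compiles the whole pattern first, raises KeyError).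
def Pre_pam_matches_at_py (seq : String) (i : Int) (pam : String) : Prop :=
  (i < 0 ∨ i + PySem.Str.len pam > PySem.Str.len seq) ∨
  pam.toList.all (fun c => (['A','C','G','T','U','R','Y','S','W','K','M','B','D','H','V','N'] : List Char).contains (PySem.Chars.upperChar c)) = true
instance (seq : String) (i : Int) (pam : String) : Decidable (Pre_pam_matches_at_py seq i pam) := by
  unfold Pre_pam_matches_at_py; infer_instance

def pvWitness_pam_matches_at_py : String × Int × String := ("ACGT", 0, "NG")

def Spec_pam_matches_at_py (seq : String) (i : Int) (pam : String) (out : Bool) : Prop := out = pam_matches_at_py_alt seq i pam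
instance (seq : String) (i : Int) (pam : String) (out : Bool) : Decidable (Spec_pam_matches_at_py seq i pam out) := by unfold Spec_pam_matches_at_py; infer_instance

-- ===== CLAIM (what is proved, stated in full; the proofs are below) =====
def Claim_equal_pam_matches_at_py : Prop := ∀ (seq : String) (i : Int) (pam : String), Dom_pam_matches_at_py seq i pam → Pre_pam_matches_at_py seq i pam → Spec_pam_matches_at_py seq i pam (pam_matches_at_py seq i pam)

-- ===== LEMMAS AND PROOFS =====

-- the normalization A applies per fetched character and B applies to the whole window at once
def normChar (c : Char) : Char := if PySem.Chars.upperChar c = 'U' then 'T' else PySem.Chars.upperChar c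

-- the chunk of pattern contributed by one (uppercased) IUPAC code
def chunkOf (c : Char) : List Char :=
  ((PySem.Dict.get? IUPAC_DNA (String.ofList [c])).getD "").toList

-- the set of bases an IUPAC code admits, as a list (used only in the proofs)
def classChars (c : Char) : List Char :=
  if c = 'A' then ['A'] else if c = 'C' then ['C'] else if c = 'G' then ['G']
  else if c = 'T' then ['T'] else if c = 'U' then ['T']
  else if c = 'R' then ['A','G'] else if c = 'Y' then ['C','T'] else if c = 'S' then ['G','C']
  else if c = 'W' then ['A','T'] else if c = 'K' then ['G','T'] else if c = 'M' then ['A','C']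
  else if c = 'B' then ['C','G','T'] else if c = 'D' then ['A','G','T'] else if c = 'H' then ['A','C','T']
  else if c = 'V' then ['A','C','G'] else if c = 'N' then ['A','C','G','T'] else []

theorem go_acc (n : Nat) : ∀ (t acc : List Char),
    PySem.Chars.replace.go ['U'] ['T'] n t acc = acc.reverse ++ PySem.Chars.replace.go ['U'] ['T'] n t [] := by
  induction n with
  | zero => intro t acc; simp [PySem.Chars.replace.go]
  | succ n ih =>
    intro t acc
    cases t with
    | nil => simp [PySem.Chars.replace.go]
    | cons c t =>
      by_cases h : c = 'U'
      · subst h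
        simp only [PySem.Chars.replace.go]
        simp
        rw [ih t ('T' :: acc), ih t ['T']]
        simp
      · simp only [PySem.Chars.replace.go]
        simp [Ne.symm h]
        rw [ih t (c :: acc), ih t [c]]
        simp

theorem go_map (n : Nat) : ∀ t : List Char, t.length ≤ n →
    PySem.Chars.replace.go ['U'] ['T'] n t [] = t.map (fun c => if c = 'U' then 'T' else c) := by
  induction n with
  | zero => intro t ht; rw [List.length_eq_zero_iff.mp (Nat.le_zero.mp ht)]; simp [PySem.Chars.replace.go]
  | succ n ih =>
    intro t ht
    cases t with
    | nil => simp [PySem.Chars.replace.go]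
    | cons c t =>
      by_cases h : c = 'U'
      · subst h
        simp only [PySem.Chars.replace.go]
        simp
        rw [go_acc n t ['T'], ih t (by simpa using ht)]
        simp
      · simp only [PySem.Chars.replace.go]
        simp [Ne.symm h]
        rw [go_acc n t [c], ih t (by simpa using ht)]
        simp [h]

theorem rep_map (l : List Char) :
    PySem.Chars.replace l ['U'] ['T'] = l.map (fun c => if c = 'U' then 'T' else c) := by
  simp [PySem.Chars.replace]
  exact go_map l.length l le_rfl

theorem rep_single (u : Char) :
    PySem.Chars.replace [u] ['U'] ['T'] = if u = 'U' then ['T'] else [u] := by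
  rw [rep_map]; by_cases h : u = 'U' <;> simp [h]

theorem isIn_single (x : Char) (l : List Char) :
    PySem.Chars.isIn [x] l = decide (x ∈ l) := by
  by_cases h : x ∈ l
  · rw [(PySem.Chars.isIn_iff_infix _ _).mpr ((List.singleton_infix_iff x l).mpr h)]
    simp [h]
  · rw [(PySem.Chars.isIn_eq_false_iff _ _).mpr (fun hinf => h ((List.singleton_infix_iff x l).mp hinf))]
    simp [h]

theorem base_eq (ch : Char) :
    PySem.Str.replace (PySem.Str.upper (String.ofList [ch])) "U" "T"
      = String.ofList [normChar ch] := by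
  rw [String.ext_iff]
  simp [PySem.Str.toList_replace, PySem.Str.toList_upper, PySem.Chars.upper, rep_single, normChar]
  split <;> simp_all

-- A's loop step equals a membership test in classChars
theorem stepA_eq (u c : Char) (k : Bool)
    (hc : c ∈ (['A','C','G','T','U','R','Y','S','W','K','M','B','D','H','V','N'] : List Char)) :
    (if PySem.Str.startswith ((PySem.Dict.get? IUPAC_DNA (String.ofList [c])).getD "") "[" then
       (if !PySem.Str.isIn (String.ofList [u])
            (PySem.Str.stripChars ((PySem.Dict.get? IUPAC_DNA (String.ofList [c])).getD "") "[]")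
        then false else k)
     else
       (if String.ofList [u] != (PySem.Dict.get? IUPAC_DNA (String.ofList [c])).getD "" then false else k))
    = ((classChars c).contains u && k) := by
  fin_cases hc <;>
    simp_all [IUPAC_DNA, classChars, PySem.Dict.get?,
      PySem.Str.isIn, PySem.Str.startswith, PySem.Chars.startswith, List.isPrefixOf,
      PySem.Str.stripChars, PySem.Chars.stripChars, isIn_single, String.ext_iff, bne]

-- B's matcher on one chunk equals the same membership test
theorem stepB_eq (u c : Char) (prest bs : List Char)
    (hc : c ∈ (['A','C','G','T','U','R','Y','S','W','K','M','B','D','H','V','N'] : List Char)) :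
    fullmatchB (chunkOf c ++ prest) (u :: bs)
      = ((classChars c).contains u && fullmatchB prest bs) := by
  fin_cases hc <;>
    simp [chunkOf, classChars, IUPAC_DNA, PySem.Dict.get?, fullmatchB,
      List.takeWhile, List.dropWhile] <;>
    by_cases h1 : u = 'A' <;> by_cases h2 : u = 'C' <;> by_cases h3 : u = 'G' <;>
      by_cases h4 : u = 'T' <;> simp_all [BEq.comm]

theorem loopA_eq (seq : String) (i : Int) (hi : 0 ≤ i) :
    ∀ (l : List Char) (m : Nat),
      (∀ c ∈ l, c ∈ (['A','C','G','T','U','R','Y','S','W','K','M','B','D','H','V','N'] : List Char)) →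
      i.toNat + m + l.length ≤ seq.toList.length →
      pamLoopA seq i (l.zipIdx m) =
        fullmatchB (l.flatMap chunkOf)
          (((seq.toList.drop (i.toNat + m)).take l.length).map normChar) := by
  intro l
  induction l with
  | nil => intro m _ _; simp [pamLoopA, fullmatchB]
  | cons c l ih =>
    intro m hval hlen
    rw [List.length_cons] at hlen
    have hlt : i.toNat + m < seq.toList.length := by omega
    rw [List.zipIdx_cons]
    have hget : (PySem.Str.pyGet? seq (i + (m : Int))).getD ' ' = seq.toList[i.toNat + m] := by
      rw [show i + (m : Int) = ((i.toNat + m : Nat) : Int) by omega]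
      rw [PySem.Str.pyGet?_natCast, List.getElem?_eq_getElem hlt]
      rfl
    have hdrop : seq.toList.drop (i.toNat + m)
        = seq.toList[i.toNat + m] :: seq.toList.drop (i.toNat + m + 1) :=
      List.drop_eq_getElem_cons hlt
    rw [hdrop]
    simp only [pamLoopA, hget, List.length_cons, List.take_succ_cons, List.map_cons,
      List.flatMap_cons, base_eq]
    rw [stepB_eq _ c _ _ (hval c (by simp)), stepA_eq _ c _ (hval c (by simp))]
    congr 1
    have htail := ih (m + 1) (fun x hx => hval x (by simp [hx])) (by omega)
    rw [show i.toNat + (m + 1) = i.toNat + m + 1 by omega] at htail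
    exact htail

-- ===== VERDICT (by name: the statement is the Claim_ definition above) =====
theorem pam_matches_at_py_spec : Claim_equal_pam_matches_at_py := by
  intro seq i pam _ hpre
  unfold Spec_pam_matches_at_py pam_matches_at_py pam_matches_at_py_alt
  by_cases hg : i < 0 ∨ i + PySem.Str.len pam > PySem.Str.len seq
  · rw [if_pos hg, if_pos hg]
  · rw [if_neg hg, if_neg hg]
    rcases hpre with hg' | hval0
    · exact absurd hg' hg
    have hval : ∀ x ∈ pam.toList,
        PySem.Chars.upperChar x ∈ (['A','C','G','T','U','R','Y','S','W','K','M','B','D','H','V','N'] : List Char) := by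
      intro x hx
      have := List.all_eq_true.mp hval0 x hx
      simpa using this
    rw [not_or, not_lt, not_lt] at hg
    obtain ⟨hi, hle⟩ := hg
    have hi0 : i = ((i.toNat : Nat) : Int) := (Int.toNat_of_nonneg hi).symm
    have hlen : PySem.Str.len pam = (pam.toList.length : Int) := PySem.Str.len_eq pam
    have hlen2 : PySem.Str.len seq = (seq.toList.length : Int) := PySem.Str.len_eq seq
    have hup : (PySem.Str.upper pam).toList = PySem.Chars.upper pam.toList := PySem.Str.toList_upper pam
    have hlength : (PySem.Str.upper pam).toList.length = pam.toList.length := by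
      rw [hup]; simp [PySem.Chars.upper]
    have hvall : ∀ c ∈ (PySem.Str.upper pam).toList,
        c ∈ (['A','C','G','T','U','R','Y','S','W','K','M','B','D','H','V','N'] : List Char) := by
      rw [hup]; intro c hcm
      simp only [PySem.Chars.upper, List.mem_map] at hcm
      obtain ⟨x, hx, rfl⟩ := hcm
      exact hval x hx
    have hsub : (PySem.Str.replace (PySem.Str.upper (PySem.Str.slice seq (some i) (some (i + PySem.Str.len pam)))) "U" "T").toList
        = ((seq.toList.drop (i.toNat + 0)).take (PySem.Str.upper pam).toList.length).map normChar := by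
      rw [PySem.Str.toList_replace, PySem.Str.toList_upper, PySem.Str.toList_slice, hlen]
      rw [show i + (pam.toList.length : Int) = ((i.toNat + pam.toList.length : Nat) : Int) by omega]
      rw [show (some i : Option Int) = some ((i.toNat : Nat) : Int) by rw [← hi0]]
      rw [PySem.Chars.slice_eq_listSlice, PySem.List.slice_natCast]
      rw [hlength, Nat.add_sub_cancel_left, Nat.add_zero,
        show ("U".toList : List Char) = ['U'] from rfl, show ("T".toList : List Char) = ['T'] from rfl,
        rep_map]
      simp [PySem.Chars.upper, Function.comp_def]
      rfl
    have hbound : i.toNat + 0 + (PySem.Str.upper pam).toList.length ≤ seq.toList.length := by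
      rw [hlength]
      rw [hlen, hlen2] at hle
      omega
    have hmain := loopA_eq seq i hi (PySem.Str.upper pam).toList 0 hvall hbound
    simp only [hsub]
    exact hmain
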